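-- pv_equiv track=rewrite | github.com/mkrg01/permucn | permucn/permutation.py | _bin_counts
-- ===== SOURCE A (Python) =====
-- from typing import Dict, List, Sequence, Tuple
--
-- def _bin_counts(mask: int, bin_by_idx: Sequence[int]) -> List[int]:
--     out = [0] * 8
--     m = mask
--     while m:
--         lsb = m & -m
--         idx = lsb.bit_length() - 1
--         out[bin_by_idx[idx]] += 1
--         m ^= lsb
--     return out
-- ===== SOURCE B (Python) =====
-- from typing import List, Sequence
--
-- def _bin_counts(mask: int, bin_by_idx: Sequence[int]) -> List[int]:
--     out = [0] * 8
--     for idx in range(mask.bit_length()):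
--         if (mask >> idx) & 1:
--             out[bin_by_idx[idx]] += 1
--     return out
-- ===== Notes on version B (the rewrite author's own statement) =====
-- stated objective: idiomatic
-- what changed: Replaces the lowest-set-bit extraction loop (m & -m, bit_length, XOR-clearing) with a plain positional scan over range(mask.bit_length()) testing (mask >> idx) & 1, visiting set bits in the same ascending order; Pre_ excludes only negative masks (A's while-loop never terminates) and inputs where A raises IndexError (a set-bit position beyond bin_by_idx, or a bin value outside the 8-slot output).
import Mathlib
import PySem

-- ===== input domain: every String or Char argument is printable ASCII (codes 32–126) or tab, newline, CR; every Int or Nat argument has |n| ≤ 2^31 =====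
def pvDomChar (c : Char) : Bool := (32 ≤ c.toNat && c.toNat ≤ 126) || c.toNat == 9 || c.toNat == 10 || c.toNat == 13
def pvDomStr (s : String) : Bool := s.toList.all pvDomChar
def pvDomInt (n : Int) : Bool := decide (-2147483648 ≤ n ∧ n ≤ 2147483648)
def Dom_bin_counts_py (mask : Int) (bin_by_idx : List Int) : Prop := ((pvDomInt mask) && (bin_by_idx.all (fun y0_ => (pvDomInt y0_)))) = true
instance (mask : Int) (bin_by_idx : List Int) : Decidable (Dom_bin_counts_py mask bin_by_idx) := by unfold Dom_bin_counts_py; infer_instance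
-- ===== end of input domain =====

-- B replaces A's lowest-set-bit extraction loop (m & -m, bit_length, XOR-clearing) with a
-- positional scan over range(mask.bit_length()); same outputs on Pre_ (mask ≥ 0, indices in range).

-- `out[bin_by_idx[idx]] += 1` — the identical Python statement occurring in both A and B.
-- On an out-of-range index Python raises IndexError (excluded by Pre_); here it leaves `out` unchanged.
def pvBump (bin_by_idx out : List Int) (idx : Nat) : List Int :=
  match PySem.List.pyGet? bin_by_idx (idx : Int) with
  | none => out
  | some b =>
    match PySem.List.pyGet? out b with
    | none => out
    | some v => PySem.List.pySetD out b (v + 1)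

-- The next lemmas exist only to justify termination of A's `while m:` loop (pv_step_lt is
-- cited by binLoopA's decreasing_by); they are reused by the equivalence proof below.
-- Every positive n is 2^(t+1)*q + 2^t (t = index of the lowest set bit).
theorem pv_decomp (n : Nat) (h : 0 < n) : ∃ t q, n = 2 ^ (t + 1) * q + 2 ^ t := by
  induction n using Nat.strong_induction_on with
  | _ n ih =>
    rcases Nat.even_or_odd n with ⟨m, hm⟩ | ⟨m, hm⟩
    · have hm' : 0 < m := by omega
      obtain ⟨t, q, ht⟩ := ih m (by omega) hm'
      exact ⟨t + 1, q, by subst hm ht; ring⟩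
    · exact ⟨0, m, by omega⟩

theorem pv_and_pred (t q : Nat) : (2 ^ (t + 1) * q + 2 ^ t) &&& (2 ^ (t + 1) * q + 2 ^ t - 1) = 2 ^ (t + 1) * q := by
  have h2 : (0:Nat) < 2 ^ t := Nat.two_pow_pos t
  have hlt : 2 ^ t < 2 ^ (t + 1) := Nat.pow_lt_pow_right (by norm_num) (by omega)
  have hsub : 2 ^ (t + 1) * q + 2 ^ t - 1 = 2 ^ (t + 1) * q + (2 ^ t - 1) := by omega
  apply Nat.eq_of_testBit_eq
  intro i
  rw [Nat.testBit_and, hsub]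
  rw [Nat.testBit_two_pow_mul_add q hlt i]
  rw [Nat.testBit_two_pow_mul_add q (by omega) i]
  have h0 : 2 ^ (t + 1) * q = 2 ^ (t + 1) * q + 0 := by omega
  rw [h0, Nat.testBit_two_pow_mul_add q (Nat.two_pow_pos (t + 1)) i]
  by_cases hi : i < t + 1
  · simp only [hi, if_pos, Nat.testBit_two_pow, Nat.testBit_two_pow_sub_one, Nat.zero_testBit]
    by_cases hti : t = i <;> simp [hti]
  · simp [hi]

theorem pv_xor_lowbit (t q : Nat) : (2 ^ (t + 1) * q + 2 ^ t) ^^^ 2 ^ t = 2 ^ (t + 1) * q := by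
  have hlt : 2 ^ t < 2 ^ (t + 1) := Nat.pow_lt_pow_right (by norm_num) (by omega)
  apply Nat.eq_of_testBit_eq
  intro i
  rw [Nat.testBit_xor]
  rw [Nat.testBit_two_pow_mul_add q hlt i]
  have h0 : 2 ^ (t + 1) * q = 2 ^ (t + 1) * q + 0 := by omega
  rw [h0, Nat.testBit_two_pow_mul_add q (Nat.two_pow_pos (t + 1)) i]
  by_cases hi : i < t + 1
  · simp only [hi, if_pos, Nat.testBit_two_pow, Nat.zero_testBit]
    by_cases hti : t = i <;> simp [hti]
  · simp only [hi, Nat.testBit_two_pow, Nat.zero_testBit]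
    have : ¬ (t = i) := by omega
    simp [this]

-- m & -m for positive m = ↑n, through PySem.Int.band's two's-complement definition
theorem pv_band_neg (n : Nat) (t q : Nat) (hn : n = 2 ^ (t + 1) * q + 2 ^ t) :
    PySem.Int.band (n : Int) (-(n : Int)) = ((2 ^ t : Nat) : Int) := by
  have h2 : (0:Nat) < 2 ^ t := Nat.two_pow_pos t
  have hpos : 0 < n := by omega
  have hneg : ¬ (0:Int) ≤ -(n : Int) := by omega
  simp only [PySem.Int.band, Int.natCast_nonneg, if_true, hneg, if_false]
  have h1 : (-(-(n:Int)) - 1).toNat = n - 1 := by omega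
  have h0 : ((n:Int)).toNat = n := by omega
  rw [h1, h0, hn, pv_and_pred t q]
  congr 1
  omega

-- clearing the lowest set bit strictly decreases a positive m (termination of A's loop)
theorem pv_step_lt (m : Int) (h : 0 < m) :
    (PySem.Int.bxor m (PySem.Int.band m (-m))).toNat < m.toNat := by
  obtain ⟨n, hn⟩ : ∃ n : Nat, m = (n : Int) := ⟨m.toNat, by omega⟩
  subst hn
  obtain ⟨t, q, ht⟩ := pv_decomp n (by omega)
  rw [pv_band_neg n t q ht, PySem.Int.bxor_natCast, ht, pv_xor_lowbit t q]
  have h2 : (0:Nat) < 2 ^ t := Nat.two_pow_pos t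
  simp only [Int.toNat_natCast]
  omega

-- ===== PORT A =====
-- while m: lsb = m & -m; idx = lsb.bit_length() - 1; out[bin_by_idx[idx]] += 1; m ^= lsb
-- Guard `m ≤ 0`: the loop exits at m = 0; for m < 0 the Python loop never terminates
-- (excluded by Pre_), so the guard only makes the recursion total.
def binLoopA (bin_by_idx : List Int) (m : Int) (out : List Int) : List Int :=
  if h : m ≤ 0 then out
  else
    let lsb := PySem.Int.band m (-m)
    let idx := PySem.Int.bitLength lsb - 1
    binLoopA bin_by_idx (PySem.Int.bxor m lsb) (pvBump bin_by_idx out idx)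
termination_by m.toNat
decreasing_by exact pv_step_lt m (by omega)

def bin_counts_py (mask : Int) (bin_by_idx : List Int) : List Int :=
  binLoopA bin_by_idx mask (List.replicate 8 0)

-- ===== PORT B =====
-- for idx in range(mask.bit_length()): if (mask >> idx) & 1: out[bin_by_idx[idx]] += 1
def bin_counts_py_alt (mask : Int) (bin_by_idx : List Int) : List Int :=
  (List.range (PySem.Int.bitLength mask)).foldl
    (fun (out : List Int) (idx : Nat) =>
      if PySem.Int.band (mask >>> idx) 1 ≠ 0 then pvBump bin_by_idx out idx else out)
    (List.replicate 8 0)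

-- ===== PRECONDITION & SPEC =====
-- Pre_: mask ≥ 0 (a negative mask makes A's while-loop run forever) and, at every set bit
-- position of mask (all of which lie below mask.bit_length(), the quantifier bound — not a
-- size cap), bin_by_idx has an entry and that entry is a valid Python index into the
-- 8-element out list (otherwise A raises IndexError).
def Pre_bin_counts_py (mask : Int) (bin_by_idx : List Int) : Prop :=
  0 ≤ mask ∧ ∀ i < PySem.Int.bitLength mask, mask.toNat.testBit i →
    i < bin_by_idx.length ∧ PySem.Raise.InRange 8 (PySem.List.pyGetD bin_by_idx (i : Int) 0)
instance (mask : Int) (bin_by_idx : List Int) : Decidable (Pre_bin_counts_py mask bin_by_idx) := by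
  unfold Pre_bin_counts_py; infer_instance

def pvWitness_bin_counts_py : Int × List Int := (5, [0, 1, 2])

def Spec_bin_counts_py (mask : Int) (bin_by_idx : List Int) (out : List Int) : Prop := out = bin_counts_py_alt mask bin_by_idx
instance (mask : Int) (bin_by_idx : List Int) (out : List Int) : Decidable (Spec_bin_counts_py mask bin_by_idx out) := by unfold Spec_bin_counts_py; infer_instance

-- ===== CLAIM (what is proved, stated in full; the proofs are below) =====
def Claim_equal_bin_counts_py : Prop := ∀ (mask : Int) (bin_by_idx : List Int), Dom_bin_counts_py mask bin_by_idx → Pre_bin_counts_py mask bin_by_idx → Spec_bin_counts_py mask bin_by_idx (bin_counts_py mask bin_by_idx)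

-- ===== LEMMAS AND PROOFS =====

theorem pv_bitLength_two_pow (t : Nat) : PySem.Int.bitLength ((2 ^ t : Nat) : Int) = t + 1 := by
  induction t with
  | zero => rw [PySem.Int.bitLength_natCast (by norm_num)]; norm_num [PySem.Int.bitLength_zero]
  | succ t ih =>
    rw [PySem.Int.bitLength_natCast (Nat.two_pow_pos (t + 1))]
    have h : 2 ^ (t + 1) / 2 = 2 ^ t := by
      rw [pow_succ, Nat.mul_div_cancel]; norm_num
    rw [h, ih]


theorem pv_range_split (L' L : Nat) (h : L' ≤ L) :
    List.range L = List.range L' ++ List.range' L' (L - L') := by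
  rw [List.range_eq_range', List.range_eq_range']
  have h2 := List.range'_append (s := 0) (m := L') (n := L - L') (step := 1)
  simp only [Nat.one_mul, Nat.zero_add] at h2
  rw [h2]; congr 1; omega

-- every set bit of n lies below bitLength ↑n
theorem pv_testBit_lt_bitLength (n i : Nat) (h : n.testBit i = true) :
    i < PySem.Int.bitLength (n : Int) := by
  by_contra hge
  have h1 : n < 2 ^ PySem.Int.bitLength (n : Int) := by
    have := PySem.Int.lt_two_pow_bitLength (n : Int)
    simpa using this
  have h2 : n < 2 ^ i :=
    lt_of_lt_of_le h1 (Nat.pow_le_pow_right (by norm_num) (by omega))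
  rw [Nat.testBit_lt_two_pow h2] at h
  exact Bool.false_ne_true h

theorem pv_bitLength_mono (a b : Nat) (h : a ≤ b) :
    PySem.Int.bitLength (a : Int) ≤ PySem.Int.bitLength (b : Int) := by
  by_cases ha : a = 0
  · subst ha; simp [PySem.Int.bitLength_zero]
  · have h1 := PySem.Int.two_pow_bitLength_le (a : Int) (by exact_mod_cast ha)
    have h2 := PySem.Int.lt_two_pow_bitLength (b : Int)
    simp only [Int.natAbs_natCast] at h1 h2
    have h3 : 2 ^ (PySem.Int.bitLength (a : Int) - 1) < 2 ^ PySem.Int.bitLength (b : Int) := by omega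
    have h4 := (Nat.pow_lt_pow_iff_right (by norm_num : 1 < 2)).mp h3
    omega

-- extending the scanned range beyond every set bit adds nothing
theorem pv_filter_range_stable (n L L' : Nat) (hLL : L' ≤ L)
    (hbits : ∀ i, n.testBit i = true → i < L') :
    (List.range L).filter n.testBit = (List.range L').filter n.testBit := by
  rw [pv_range_split L' L hLL, List.filter_append]
  have h : (List.range' L' (L - L')).filter n.testBit = [] := by
    rw [List.filter_eq_nil_iff]
    intro a ha
    have : L' ≤ a := (List.mem_range'_1.mp ha).1
    intro hb
    exact absurd (hbits a hb) (by omega)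
  rw [h, List.append_nil]

-- the ascending set-bit list of n = 2^(t+1)q + 2^t starts with t, followed by the bits of n - 2^t
theorem pv_filter_cons (t q L : Nat) (hL : t < L) :
    (List.range L).filter (2 ^ (t + 1) * q + 2 ^ t).testBit
      = t :: (List.range L).filter (2 ^ (t + 1) * q).testBit := by
  have hlt : 2 ^ t < 2 ^ (t + 1) := Nat.pow_lt_pow_right (by norm_num) (by omega)
  have hbitn : ∀ i, (2 ^ (t + 1) * q + 2 ^ t).testBit i
      = if i < t + 1 then (2 ^ t).testBit i else q.testBit (i - (t + 1)) :=
    fun i => Nat.testBit_two_pow_mul_add q hlt i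
  have hbitn' : ∀ i, (2 ^ (t + 1) * q).testBit i
      = if i < t + 1 then false else q.testBit (i - (t + 1)) := by
    intro i
    have h0 : 2 ^ (t + 1) * q = 2 ^ (t + 1) * q + 0 := by omega
    rw [h0, Nat.testBit_two_pow_mul_add q (Nat.two_pow_pos (t + 1)) i]
    simp [Nat.zero_testBit]
  have hrest : List.range' t (L - t) = t :: List.range' (t + 1) (L - t - 1) := by
    conv_lhs => rw [show L - t = (L - t - 1) + 1 from by omega]
    rw [List.range'_succ]
  have hlow : (List.range t).filter (2 ^ (t + 1) * q + 2 ^ t).testBit = [] := by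
    rw [List.filter_eq_nil_iff]
    intro a ha
    have ha' : a < t := List.mem_range.mp ha
    rw [hbitn a, if_pos (by omega), Nat.testBit_two_pow]
    simp; omega
  have hlow' : (List.range t).filter (2 ^ (t + 1) * q).testBit = [] := by
    rw [List.filter_eq_nil_iff]
    intro a ha
    have ha' : a < t := List.mem_range.mp ha
    rw [hbitn' a, if_pos (by omega)]
    simp
  have hhit : (2 ^ (t + 1) * q + 2 ^ t).testBit t = true := by
    rw [hbitn t, if_pos (by omega), Nat.testBit_two_pow]
    simp
  have hmiss : (2 ^ (t + 1) * q).testBit t = false := by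
    rw [hbitn' t, if_pos (by omega)]
  have hagree : ∀ a ∈ List.range' (t + 1) (L - t - 1),
      (2 ^ (t + 1) * q + 2 ^ t).testBit a = (2 ^ (t + 1) * q).testBit a := by
    intro a ha
    have : t + 1 ≤ a := (List.mem_range'_1.mp ha).1
    rw [hbitn a, hbitn' a, if_neg (by omega), if_neg (by omega)]
  rw [pv_range_split t L (by omega), List.filter_append, List.filter_append, hlow, hlow', hrest]
  simp only [List.filter_cons, hhit, hmiss, if_pos, List.nil_append, Bool.false_eq_true, if_false]
  rw [List.filter_congr hagree]

-- B's loop test `(mask >> idx) & 1 != 0` is testBit, for non-negative mask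
theorem pv_test_iff (n idx : Nat) :
    (PySem.Int.band ((n : Int) >>> idx) 1 ≠ 0) ↔ n.testBit idx = true := by
  rw [show ((n : Int) >>> idx) = (((n >>> idx : Nat)) : Int) from by simp [Int.natCast_shiftRight]]
  rw [show (1 : Int) = ((1 : Nat) : Int) from rfl, PySem.Int.band_natCast]
  simp [Nat.testBit, Nat.and_one_is_mod, Nat.shiftRight_eq_div_pow]
  exact_mod_cast Iff.rfl

-- A's loop computes the fold of pvBump over the ascending set-bit positions of mask
theorem pv_loopA_eq_fold (bin_by_idx : List Int) (n : Nat) : ∀ out : List Int,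
    binLoopA bin_by_idx (n : Int) out
      = ((List.range (PySem.Int.bitLength (n : Int))).filter n.testBit).foldl
          (pvBump bin_by_idx) out := by
  induction n using Nat.strong_induction_on with
  | _ n ih =>
    intro out
    by_cases h0 : n = 0
    · subst h0
      rw [binLoopA]
      simp [PySem.Int.bitLength_zero]
    · obtain ⟨t, q, ht⟩ := pv_decomp n (by omega)
      have h2 : (0:Nat) < 2 ^ t := Nat.two_pow_pos t
      have hpos : ¬ ((n : Int) ≤ 0) := by omega
      rw [binLoopA, dif_neg hpos]
      rw [pv_band_neg n t q ht]
      show binLoopA bin_by_idx (PySem.Int.bxor (↑n) ((2 ^ t : Nat) : Int))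
          (pvBump bin_by_idx out (PySem.Int.bitLength ((2 ^ t : Nat) : Int) - 1)) = _
      rw [PySem.Int.bxor_natCast, pv_bitLength_two_pow]
      simp only [Nat.add_sub_cancel]
      have hxor : n ^^^ 2 ^ t = 2 ^ (t + 1) * q := by rw [ht]; exact pv_xor_lowbit t q
      rw [hxor]
      have hlt : 2 ^ (t + 1) * q < n := by rw [ht]; omega
      rw [ih (2 ^ (t + 1) * q) hlt (pvBump bin_by_idx out t)]
      have hbt : n.testBit t = true := by
        rw [ht, Nat.testBit_two_pow_mul_add q (Nat.pow_lt_pow_right (by norm_num) (by omega)) t,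
          if_pos (by omega), Nat.testBit_two_pow]
        simp
      have htL : t < PySem.Int.bitLength (n : Int) := pv_testBit_lt_bitLength n t hbt
      have hstable : (List.range (PySem.Int.bitLength (n : Int))).filter (2 ^ (t + 1) * q).testBit
          = (List.range (PySem.Int.bitLength ((2 ^ (t + 1) * q : Nat) : Int))).filter (2 ^ (t + 1) * q).testBit :=
        pv_filter_range_stable _ _ _ (pv_bitLength_mono _ _ (by omega))
          (fun i hi => pv_testBit_lt_bitLength _ i hi)
      rw [← hstable]
      have hfun : n.testBit = (2 ^ (t + 1) * q + 2 ^ t).testBit := by rw [ht]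
      rw [hfun, pv_filter_cons t q _ htL, List.foldl_cons]

-- ===== VERDICT (by name: the statement is the Claim_ definition above) =====
theorem bin_counts_py_spec : Claim_equal_bin_counts_py := by
  intro mask bin_by_idx hdom hpre
  unfold Spec_bin_counts_py bin_counts_py bin_counts_py_alt
  obtain ⟨hm, _⟩ := hpre
  obtain ⟨n, hn⟩ : ∃ n : Nat, mask = (n : Int) := ⟨mask.toNat, by omega⟩
  subst hn
  rw [pv_loopA_eq_fold, List.foldl_filter]
  have hf : (fun (x : List Int) (y : Nat) => if n.testBit y = true then pvBump bin_by_idx x y else x)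
      = fun (out : List Int) (idx : Nat) =>
          if PySem.Int.band ((n : Int) >>> idx) 1 ≠ 0 then pvBump bin_by_idx out idx else out := by
    funext out idx
    by_cases hb : n.testBit idx
    · rw [if_pos hb, if_pos ((pv_test_iff n idx).mpr hb)]
    · rw [if_neg (by simpa using hb), if_neg (fun hc => hb ((pv_test_iff n idx).mp hc))]
  rw [hf]
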